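-- pv_equiv track=rewrite | github.com/ishmaelaqsar/advent_of_code | 2023/day1.py | get_calibration_value
-- ===== SOURCE A (Python) =====
-- MAPP = {
--     'one': '1',
--     'two': '2',
--     'three': '3',
--     'four': '4',
--     'five': '5',
--     'six': '6',
--     'seven': '7',
--     'eight': '8',
--     'nine': '9',
-- }
--
-- def check_string(string, digits):
--     string = MAPP[string] if string in MAPP else string
--     if string.isdigit():
--         digits[1] = string
--         if not digits[0]:
--             digits[0] = string
--
-- def get_calibration_value(text):
--     digits = [None, None]
--
--     for i in range(len(text)):
--         for j in range(len(text) + 1):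
--             sub = text[i:j]
--             check_string(sub, digits)
--
--     if not digits[0]: return 0
--     return int(digits[0] + digits[1])
-- ===== SOURCE B (Python) =====
-- WORDS = {
--     'one': 1, 'two': 2, 'three': 3, 'four': 4, 'five': 5,
--     'six': 6, 'seven': 7, 'eight': 8, 'nine': 9,
-- }
--
-- def get_calibration_value(text):
--     # single left-to-right scan: at each position match a digit char or a spelled word
--     first = last = -1
--     for i, c in enumerate(text):
--         if '0' <= c <= '9':
--             d = ord(c) - ord('0')
--         else:
--             d = next((v for w, v in WORDS.items() if text.startswith(w, i)), -1)
--         if d >= 0: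
--             if first < 0:
--                 first = d
--             last = d
--     return 10 * first + last if first >= 0 else 0
-- ===== Notes on version B (the rewrite author's own statement) =====
-- stated objective: faster
-- what changed: A enumerates all O(n^2) substrings text[i:j] and runs an isdigit/word-map check on each; B makes one left-to-right pass, matching a digit character or one of the nine spelled words at each position and tracking the first and last digit found.
import Mathlib
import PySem

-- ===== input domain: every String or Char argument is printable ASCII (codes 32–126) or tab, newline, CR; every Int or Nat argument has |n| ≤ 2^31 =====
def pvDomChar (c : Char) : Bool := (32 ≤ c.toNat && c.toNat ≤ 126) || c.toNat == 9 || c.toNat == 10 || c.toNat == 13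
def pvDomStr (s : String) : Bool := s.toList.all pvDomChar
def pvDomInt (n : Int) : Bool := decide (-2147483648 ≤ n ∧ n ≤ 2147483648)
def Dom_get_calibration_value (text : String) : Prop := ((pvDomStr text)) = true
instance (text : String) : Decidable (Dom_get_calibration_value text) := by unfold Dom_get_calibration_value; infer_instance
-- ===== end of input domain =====

-- B replaces A's scan of all O(n^2) substrings by one left-to-right pass matching a digit
-- char or a spelled word at each position, tracking first and last digit (faster).


-- ===== PORT A =====
def MAPP : PySem.Dict String String := PySem.Dict.mk
  [("one", "1"), ("two", "2"), ("three", "3"), ("four", "4"), ("five", "5"),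
   ("six", "6"), ("seven", "7"), ("eight", "8"), ("nine", "9")]

-- Python truthiness of `digits[0]` (None or a string): falsy iff None or "".
def pyFalsy (o : Option String) : Bool := o.getD "" == ""

def check_string (string : String) (digits : Option String × Option String) :
    Option String × Option String :=
  let string := if (MAPP.get? string).isSome then (MAPP.get? string).getD string else string
  if PySem.Str.strIsdigit string then
    ((if pyFalsy digits.1 then some string else digits.1), some string)
  else digits

def get_calibration_value (text : String) : Int :=
  let digits : Option String × Option String :=
    (PySem.List.pyRange 0 (PySem.Str.len text) 1).foldl (fun digits i =>
      (PySem.List.pyRange 0 (PySem.Str.len text + 1) 1).foldl (fun digits j =>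
        check_string (PySem.Str.slice text (some i) (some j)) digits) digits)
      (none, none)
  if pyFalsy digits.1 then 0
  else (PySem.Int.ofStr? (digits.1.getD "" ++ digits.2.getD "")).getD 0
  -- int(...) never raises here (both stored strings are digit strings); .getD 0 is unreachable

-- ===== PORT B =====
def WORDS : List (String × Int) :=
  [("one", 1), ("two", 2), ("three", 3), ("four", 4), ("five", 5),
   ("six", 6), ("seven", 7), ("eight", 8), ("nine", 9)]

-- text.startswith(w, i) on the character list
def startsAt (cs : List Char) (i : Nat) (w : String) : Bool :=
  w.toList.isPrefixOf (cs.drop i)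

def get_calibration_value_alt (text : String) : Int :=
  let cs := text.toList
  let fl : Int × Int :=
    (PySem.List.enumerate cs).foldl (fun fl ic =>
      let d : Int :=
        if '0' ≤ ic.2 ∧ ic.2 ≤ '9' then (ic.2.toNat : Int) - ('0'.toNat : Int)
        else match WORDS.find? (fun wv => startsAt cs ic.1.toNat wv.1) with
             | some wv => wv.2
             | none => -1
      if d ≥ 0 then ((if fl.1 < 0 then d else fl.1), d) else fl)
      (-1, -1)
  if fl.1 ≥ 0 then 10 * fl.1 + fl.2 else 0

-- ===== PRECONDITION & SPEC =====
def Spec_get_calibration_value (text : String) (out : Int) : Prop := out = get_calibration_value_alt text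
instance (text : String) (out : Int) : Decidable (Spec_get_calibration_value text out) := by unfold Spec_get_calibration_value; infer_instance

-- ===== CLAIM (what is proved, stated in full; the proofs are below) =====
def Claim_equal_get_calibration_value : Prop := ∀ (text : String), Dom_get_calibration_value text → Spec_get_calibration_value text (get_calibration_value text)

-- ===== LEMMAS AND PROOFS =====

-- the single-character digit string for a digit value z
def strOf (z : Int) : String := String.ofList [Char.ofNat (48 + z.toNat)]
-- the word→digit map applied inside check_string
def mval (s : String) : String := if (MAPP.get? s).isSome then (MAPP.get? s).getD s else s
-- check_string updates the state iff `qual`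
def qual (s : String) : Bool := PySem.Str.strIsdigit (mval s)
-- the mapped qualifying substrings of a list of substrings, in order
def Qf (L : List String) : List String := (L.filter qual).map mval
-- the substring text[i:j] (0 ≤ i,j)
def strj (cs : List Char) (i j : Nat) : String := String.ofList ((cs.drop i).take (j - i))
-- row i of A's scan: the substrings text[i:j] for j = 0..n
def rowL (cs : List Char) (i : Nat) : List String := (List.range (cs.length + 1)).map (strj cs i)
-- the digit found at position i by B's scan (none = no digit and no word here)
def gD (cs : List Char) (i : Nat) : Option Int :=
  if h : i < cs.length then
    if PySem.Chars.isdigit cs[i] then some ((cs[i].toNat : Int) - 48)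
    else (WORDS.find? (fun wv => startsAt cs i wv.1)).map (·.2)
  else none

-- check_string in terms of qual/mval
theorem check_eq (s : String) (d : Option String × Option String) :
    check_string s d =
      if qual s then ((if pyFalsy d.1 then some (mval s) else d.1), some (mval s)) else d := rfl

theorem mapp_get?_digit {s v : String} (h : MAPP.get? s = some v) :
    PySem.Str.strIsdigit v = true := by
  simp only [MAPP, PySem.Dict.get?, Option.map_eq_some_iff] at h
  obtain ⟨p, hp, rfl⟩ := h
  have hm := List.mem_of_find?_eq_some hp
  fin_cases hm <;> decide

theorem qual_iff (s : String) :
    qual s = true ↔ (MAPP.get? s).isSome = true ∨ PySem.Str.strIsdigit s = true := by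
  unfold qual mval
  by_cases hs : (MAPP.get? s).isSome = true
  · obtain ⟨v, hv⟩ := Option.isSome_iff_exists.mp hs
    simp [hv, show PySem.Chars.strIsdigit v.toList = true from mapp_get?_digit hv]
  · simp [hs]

theorem mapp_isSome_iff (s : String) :
    (MAPP.get? s).isSome = true ↔ ∃ wz ∈ WORDS, s = wz.1 := by
  simp only [MAPP, PySem.Dict.get?, Option.isSome_map]
  rw [List.find?_isSome]
  constructor
  · rintro ⟨p, hp, hps⟩
    have hs : s = p.1 := Eq.symm (by simpa using hps)
    subst hs
    fin_cases hp <;> decide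
  · rintro ⟨wz, hw, rfl⟩
    fin_cases hw <;> decide

-- A's fold over a list of substrings records (first qualifying, last qualifying)
theorem checkfold (L : List String) (a b : Option String) :
    L.foldl (fun d s => check_string s d) (a, b) =
      ((if pyFalsy a then (Qf L).head? else none).or a, (Qf L).getLast?.or b) := by
  induction L generalizing a b with
  | nil => simp [Qf]
  | cons s L ih =>
    rw [List.foldl_cons, check_eq]
    by_cases hq : qual s = true
    · have hne : (mval s == "") = false := by
        rw [beq_eq_false_iff_ne]
        intro h
        have : PySem.Str.strIsdigit (mval s) = true := hq
        rw [h] at this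
        exact absurd this (by decide)
      have hQ : Qf (s :: L) = mval s :: Qf L := by simp [Qf, hq]
      rw [if_pos hq, ih, hQ]
      have hfm : pyFalsy (some (mval s)) = false := by simp [pyFalsy, hne]
      cases hfa : pyFalsy a <;>
        simp [hfa, hfm, Option.or_some, List.getLast?_cons]
    · have hQ : Qf (s :: L) = Qf L := by simp [Qf, hq]
      rw [if_neg hq, ih, hQ]

-- the pointwise relation between A's rows and B's per-position digits
inductive RowRel : List (List String) → List (Option Int) → Prop
  | nil : RowRel [] []
  | consNone {rs os} : RowRel rs os → RowRel ([] :: rs) (none :: os)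
  | consSome {rs os} (z : Int) (r : List String) :
      r.head? = some (strOf z) →
      ((∀ o ∈ os, o = none) → ∀ x ∈ r, x = strOf z) →
      RowRel rs os → RowRel (r :: rs) (some z :: os)

theorem rowrel_core {rs : List (List String)} {os : List (Option Int)} (h : RowRel rs os) :
    rs.flatten.head? = (os.filterMap id).head?.map strOf ∧
    rs.flatten.getLast? = (os.filterMap id).getLast?.map strOf := by
  induction h with
  | nil => simp
  | consNone h ih => simpa using ih
  | consSome z r hhd hall h ih =>
    rename_i rs' os'
    obtain ⟨ih1, ih2⟩ := ih
    constructor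
    · rw [List.flatten_cons, List.head?_append, hhd]
      simp
    · rw [List.flatten_cons, List.getLast?_append]
      by_cases hfs : os'.filterMap id = []
      · have hflat : rs'.flatten = [] := by
          rw [← List.head?_eq_none_iff, ih1, hfs]
          simp
        have hosn : ∀ o ∈ os', o = none := by
          intro o ho
          exact List.filterMap_eq_nil_iff.mp hfs o ho
        have hr : ∀ x ∈ r, x = strOf z := hall hosn
        have hrne : r ≠ [] := by
          intro hcon
          rw [hcon] at hhd
          simp at hhd
        have hlast : r.getLast? = some (strOf z) := by
          obtain ⟨x, hx⟩ := Option.isSome_iff_exists.mp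
            (by simpa [List.getLast?_isSome] using hrne : r.getLast?.isSome = true)
          rw [hx, hr x (List.mem_of_getLast? hx)]
        rw [hflat]
        have he : List.filterMap id (some z :: os') = [z] := by
          have : List.filterMap id (some z :: os') = z :: List.filterMap id os' := by simp
          rw [this, hfs]
        rw [he, hlast]
        rfl
      · have h3 : (List.filterMap id os').getLast?.isSome = true := by
          rw [List.getLast?_isSome]; exact hfs
        obtain ⟨y, hy⟩ := Option.isSome_iff_exists.mp h3
        have hx : rs'.flatten.getLast? = some (strOf y) := by rw [ih2, hy]; rfl
        rw [hx, Option.some_or]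
        have he : List.filterMap id (some z :: os') = z :: List.filterMap id os' := by simp
        rw [he, List.getLast?_cons, hy]
        rfl

theorem isdigit_toNat {c : Char} (h : PySem.Chars.isdigit c = true) :
    48 ≤ c.toNat ∧ c.toNat ≤ 57 := by
  simp only [PySem.Chars.isdigit, Bool.and_eq_true, decide_eq_true_eq] at h
  exact ⟨Fin.mk_le_mk.mp h.1, Fin.mk_le_mk.mp h.2⟩

theorem strj_toList (cs : List Char) (i j : Nat) :
    (strj cs i j).toList = (cs.drop i).take (j - i) := String.toList_ofList

theorem qual_empty : qual "" = false := by decide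

-- every qualifying substring is a spelled word or a digit string
theorem qual_strj (cs : List Char) (i j : Nat) (h : qual (strj cs i j) = true) :
    (∃ wz ∈ WORDS, (cs.drop i).take (j - i) = wz.1.toList) ∨
      PySem.Chars.strIsdigit ((cs.drop i).take (j - i)) = true := by
  rcases (qual_iff _).mp h with hk | hd
  · rcases (mapp_isSome_iff _).mp hk with ⟨wz, hw, he⟩
    exact Or.inl ⟨wz, hw, by rw [← strj_toList cs i j, he]⟩
  · right
    rw [show PySem.Str.strIsdigit (strj cs i j)
          = PySem.Chars.strIsdigit ((cs.drop i).take (j - i)) by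
        rw [PySem.Str.strIsdigit, strj_toList]] at hd
    exact hd

theorem words_mapp : ∀ wz ∈ WORDS, MAPP.get? wz.1 = some (strOf wz.2) := by decide

theorem words_no_prefix : ∀ a ∈ WORDS, ∀ b ∈ WORDS,
    a.1.toList.isPrefixOf b.1.toList = true → a = b := by decide

theorem words_head : ∀ wz ∈ WORDS,
    wz.1.toList ≠ [] ∧ PySem.Chars.isdigit (wz.1.toList.headD 'a') = false := by decide

theorem strOf_words : ∀ wz ∈ WORDS, mval wz.1 = strOf wz.2 := by
  intro wz hw
  unfold mval
  rw [words_mapp wz hw]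
  rfl

theorem digits_ne_nil {p : List Char} (h : PySem.Chars.strIsdigit p = true) : p ≠ [] := by
  intro hc
  rw [hc] at h
  exact absurd h (by decide)

theorem digits_all {p : List Char} (h : PySem.Chars.strIsdigit p = true) :
    ∀ c ∈ p, PySem.Chars.isdigit c = true := by
  simp only [PySem.Chars.strIsdigit, Bool.and_eq_true, List.all_eq_true] at h
  exact h.2

theorem digits_not_key {p : List Char} (h : PySem.Chars.strIsdigit p = true) :
    (MAPP.get? (String.ofList p)).isSome = false := by
  cases hc : MAPP.get? (String.ofList p) with
  | none => rfl
  | some v =>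
  exfalso
  rcases (mapp_isSome_iff _).mp (by rw [hc]; rfl) with ⟨wz, hw, he⟩
  have hp : p = wz.1.toList := by rw [← he, String.toList_ofList]
  rw [hp] at h
  fin_cases hw <;> exact absurd h (by decide)
  

theorem mval_digits {p : List Char} (h : PySem.Chars.strIsdigit p = true) :
    mval (String.ofList p) = String.ofList p := by
  unfold mval
  rw [digits_not_key h]
  simp

theorem take_drop_head {cs : List Char} {i k : Nat} (hi : i < cs.length) (hk : 1 ≤ k) :
    ((cs.drop i).take k).head? = some cs[i] := by
  rw [List.head?_take, if_neg (by omega), List.drop_eq_getElem_cons hi]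
  rfl

theorem mem_Qf_rowL {cs : List Char} {i : Nat} {x : String} :
    x ∈ Qf (rowL cs i) ↔
      ∃ j, j < cs.length + 1 ∧ qual (strj cs i j) = true ∧ x = mval (strj cs i j) := by
  unfold Qf rowL
  rw [List.mem_map]
  constructor
  · rintro ⟨a, ha, rfl⟩
    have hf := List.mem_filter.mp ha
    rcases List.mem_map.mp hf.1 with ⟨j, hj, rfl⟩
    exact ⟨j, List.mem_range.mp hj, hf.2, rfl⟩
  · rintro ⟨j, hj, hq, rfl⟩
    exact ⟨strj cs i j, List.mem_filter.mpr
      ⟨List.mem_map.mpr ⟨j, List.mem_range.mpr hj, rfl⟩, hq⟩, rfl⟩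

-- a digit string in row i starts with cs[i]
theorem digits_at_head {cs : List Char} {i j : Nat} (hi : i < cs.length)
    (hdig : PySem.Chars.strIsdigit ((cs.drop i).take (j - i)) = true) :
    PySem.Chars.isdigit cs[i] = true := by
  have hne := digits_ne_nil hdig
  have hk : 1 ≤ j - i := by
    by_contra hk
    rw [show j - i = 0 by omega] at hne
    simp at hne
  exact digits_all hdig cs[i] (List.mem_of_mem_head? (take_drop_head hi hk))

theorem row_none {cs : List Char} {i : Nat} (hi : i < cs.length)
    (hd : PySem.Chars.isdigit cs[i] = false)
    (hf : WORDS.find? (fun wv => startsAt cs i wv.1) = none) : Qf (rowL cs i) = [] := by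
  rw [List.eq_nil_iff_forall_not_mem]
  intro x hx
  rcases mem_Qf_rowL.mp hx with ⟨j, hj, hq, -⟩
  rcases qual_strj cs i j hq with ⟨wz, hw, hp⟩ | hdig
  · have hs : startsAt cs i wz.1 = true := by
      rw [startsAt, List.isPrefixOf_iff_prefix, ← hp]
      exact List.take_prefix _ _
    exact absurd hs (by simpa using List.find?_eq_none.mp hf wz hw)
  · rw [digits_at_head hi hdig] at hd
    exact absurd hd (by simp)

theorem row_word_all {cs : List Char} {i : Nat} {wv : String × Int} (hi : i < cs.length)
    (hd : PySem.Chars.isdigit cs[i] = false)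
    (hf : WORDS.find? (fun wv => startsAt cs i wv.1) = some wv) :
    ∀ x ∈ Qf (rowL cs i), x = strOf wv.2 := by
  intro x hx
  rcases mem_Qf_rowL.mp hx with ⟨j, hj, hq, rfl⟩
  rcases qual_strj cs i j hq with ⟨wz, hw, hp⟩ | hdig
  · have hv : startsAt cs i wv.1 = true := by simpa using List.find?_some hf
    have hw' : wv ∈ WORDS := List.mem_of_find?_eq_some hf
    have hz : startsAt cs i wz.1 = true := by
      rw [startsAt, List.isPrefixOf_iff_prefix, ← hp]
      exact List.take_prefix _ _
    have hwzv : wz = wv := by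
      rcases List.prefix_or_prefix_of_prefix
          (List.isPrefixOf_iff_prefix.mp (by rw [← startsAt]; exact hz))
          (List.isPrefixOf_iff_prefix.mp (by rw [← startsAt]; exact hv)) with h1 | h1
      · exact words_no_prefix wz hw wv hw' (List.isPrefixOf_iff_prefix.mpr h1)
      · exact (words_no_prefix wv hw' wz hw (List.isPrefixOf_iff_prefix.mpr h1)).symm
    subst hwzv
    have hsj : strj cs i j = wz.1 := by
      rw [strj, hp, String.ofList_toList]
    rw [hsj, strOf_words wz hw]
  · rw [digits_at_head hi hdig] at hd
    exact absurd hd (by simp)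

theorem row_word_ne {cs : List Char} {i : Nat} {wv : String × Int} (hi : i < cs.length)
    (hf : WORDS.find? (fun wv => startsAt cs i wv.1) = some wv) : Qf (rowL cs i) ≠ [] := by
  have hv : startsAt cs i wv.1 = true := by simpa using List.find?_some hf
  have hw : wv ∈ WORDS := List.mem_of_find?_eq_some hf
  have hpre : wv.1.toList <+: cs.drop i := List.isPrefixOf_iff_prefix.mp hv
  have hlen : wv.1.toList.length ≤ cs.length - i := by
    have h1 := hpre.length_le
    rw [List.length_drop] at h1
    omega
  have hj : i + wv.1.toList.length < cs.length + 1 := by omega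
  have hsj : strj cs i (i + wv.1.toList.length) = wv.1 := by
    rw [strj, show i + wv.1.toList.length - i = wv.1.toList.length by omega,
      ← List.prefix_iff_eq_take.mp hpre, String.ofList_toList]
  have hq : qual (strj cs i (i + wv.1.toList.length)) = true := by
    rw [hsj]
    exact (qual_iff _).mpr (Or.inl (by rw [words_mapp wv hw]; rfl))
  intro hnil
  have hmem : mval (strj cs i (i + wv.1.toList.length)) ∈ Qf (rowL cs i) :=
    mem_Qf_rowL.mpr ⟨_, hj, hq, rfl⟩
  rw [hnil] at hmem
  simp at hmem

theorem filter_head_range {α : Type} (p : α → Bool) (f : Nat → α) (m j0 : Nat)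
    (hj : j0 < m) (h0 : ∀ j < j0, p (f j) = false) (hp : p (f j0) = true) :
    (((List.range m).map f).filter p).head? = some (f j0) := by
  rw [show m = j0 + (m - j0) by omega, List.range_add, List.map_append, List.filter_append]
  have hnil : ((List.range j0).map f).filter p = [] :=
    List.filter_eq_nil_iff.mpr (by
      intro a ha
      rcases List.mem_map.mp ha with ⟨j, hj', rfl⟩
      simp [h0 j (List.mem_range.mp hj')])
  rw [hnil, List.nil_append,
    show m - j0 = (m - j0 - 1) + 1 by omega, List.range_succ_eq_map,
    List.map_cons, List.map_cons, List.filter_cons]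
  simp only [Nat.add_zero]
  rw [if_pos hp]
  rfl

theorem strIsdigit_single {c : Char} (hd : PySem.Chars.isdigit c = true) :
    PySem.Chars.strIsdigit [c] = true := by
  simp [PySem.Chars.strIsdigit, hd]

theorem row_digit_head {cs : List Char} {i : Nat} (hi : i < cs.length)
    (hd : PySem.Chars.isdigit cs[i] = true) :
    (Qf (rowL cs i)).head? = some (String.ofList [cs[i]]) := by
  have h1 : strj cs i (i + 1) = String.ofList [cs[i]] := by
    rw [strj, show i + 1 - i = 1 by omega, List.drop_eq_getElem_cons hi]
    rfl
  have hq1 : qual (strj cs i (i + 1)) = true := by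
    rw [h1]
    refine (qual_iff _).mpr (Or.inr ?_)
    simp only [PySem.Str.strIsdigit, String.toList_ofList]
    exact strIsdigit_single hd
  have hq0 : ∀ j < i + 1, qual (strj cs i j) = false := by
    intro j hj
    rw [show strj cs i j = "" by rw [strj, show j - i = 0 by omega]; rfl, qual_empty]
  unfold Qf rowL
  rw [List.head?_map,
    filter_head_range qual (strj cs i) (cs.length + 1) (i + 1) (by omega) hq0 hq1]
  rw [Option.map_some, h1, mval_digits (strIsdigit_single hd)]

theorem row_digit_all {cs : List Char} {i : Nat} (hi : i < cs.length)
    (hd : PySem.Chars.isdigit cs[i] = true)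
    (hnext : ∀ h1 : i + 1 < cs.length, PySem.Chars.isdigit (cs[i + 1]'h1) = false) :
    ∀ x ∈ Qf (rowL cs i), x = String.ofList [cs[i]] := by
  intro x hx
  rcases mem_Qf_rowL.mp hx with ⟨j, hj, hq, rfl⟩
  rcases qual_strj cs i j hq with ⟨wz, hw, hp⟩ | hdig
  · exfalso
    obtain ⟨hwne, hwhead⟩ := words_head wz hw
    have hself : (cs.drop i).take (j - i) ≠ [] := by rw [hp]; exact hwne
    have hk : 1 ≤ j - i := by
      by_contra h
      rw [show j - i = 0 by omega] at hself
      simp at hself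
    have hh := take_drop_head hi hk (cs := cs)
    rw [hp] at hh
    rw [List.headD_eq_head?_getD, hh, Option.getD_some, hd] at hwhead
    exact absurd hwhead (by simp)
  · have hne := digits_ne_nil hdig
    have hk : 1 ≤ j - i := by
      by_contra h
      rw [show j - i = 0 by omega] at hne
      simp at hne
    have hh : ((cs.drop i).take (j - i)).head? = some cs[i] := take_drop_head hi hk
    by_cases hlen : 2 ≤ ((cs.drop i).take (j - i)).length
    · exfalso
      have hmin : ((cs.drop i).take (j - i)).length = min (j - i) (cs.length - i) := by
        rw [List.length_take, List.length_drop]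
      have hi1 : i + 1 < cs.length := by omega
      have hji : 2 ≤ j - i := by omega
      have hp1 : ((cs.drop i).take (j - i))[1]? = some cs[i + 1] := by
        rw [List.getElem?_take, if_pos (by omega), List.getElem?_drop]
        exact List.getElem?_eq_getElem hi1
      have : PySem.Chars.isdigit cs[i + 1] = true :=
        digits_all hdig _ (List.mem_of_getElem? hp1)
      rw [hnext hi1] at this
      exact absurd this (by simp)
    · have h1 : ((cs.drop i).take (j - i)).length = 1 := by
        have : ((cs.drop i).take (j - i)).length ≠ 0 := by
          intro hc
          exact hne (List.length_eq_zero_iff.mp hc)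
        omega
      rcases List.length_eq_one_iff.mp h1 with ⟨a, ha⟩
      have haeq : a = cs[i] := by
        rw [ha] at hh
        simpa using hh
      rw [strj, ha, haeq, mval_digits (strIsdigit_single hd)]

theorem rowrel_build_aux (cs : List Char) (k : Nat) : ∀ (i : Nat), i + k = cs.length →
    RowRel ((List.range' i k).map (fun j => Qf (rowL cs j)))
           ((List.range' i k).map (gD cs)) := by
  induction k with
  | zero =>
    intro i _
    rw [List.range'_zero]
    exact RowRel.nil
  | succ k ih =>
    intro i h
    rw [List.range'_succ, List.map_cons, List.map_cons]
    have hi : i < cs.length := by omega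
    cases hg : gD cs i with
    | none =>
      have hrow : Qf (rowL cs i) = [] := by
        unfold gD at hg
        rw [dif_pos hi] at hg
        split at hg
        · exact absurd hg (by simp)
        · rename_i hdneg
          cases hff : WORDS.find? (fun wv => startsAt cs i wv.1) with
          | none => exact row_none hi (by simpa using hdneg) hff
          | some wv => rw [hff] at hg; simp at hg
      rw [hrow]
      exact RowRel.consNone (ih (i + 1) (by omega))
    | some z =>
      unfold gD at hg
      rw [dif_pos hi] at hg
      by_cases hd : PySem.Chars.isdigit cs[i] = true
      · rw [if_pos hd] at hg
        have hzeq : strOf z = String.ofList [cs[i]] := by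
          injection hg with hz'
          rw [strOf, ← hz']
          have h48 : (48 : Nat) ≤ cs[i].toNat := (isdigit_toNat hd).1
          rw [show (((cs[i].toNat : Int)) - 48).toNat = cs[i].toNat - 48 by omega,
            show 48 + (cs[i].toNat - 48) = cs[i].toNat by omega, Char.ofNat_toNat]
        refine RowRel.consSome z _ ?_ ?_ (ih (i + 1) (by omega))
        · rw [hzeq]
          exact row_digit_head hi hd
        · intro hall x hx
          rw [hzeq]
          refine row_digit_all hi hd ?_ x hx
          intro hi1
          by_contra hd1
          have hnone : gD cs (i + 1) = none := by
            apply hall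
            exact List.mem_map.mpr ⟨i + 1, List.mem_range'_1.mpr ⟨by omega, by omega⟩, rfl⟩
          unfold gD at hnone
          rw [dif_pos hi1, if_pos (by simpa using hd1)] at hnone
          simp at hnone
      · rw [if_neg hd] at hg
        rcases Option.map_eq_some_iff.mp hg with ⟨wv, hwv, rfl⟩
        have hall := row_word_all hi (by simpa using hd) hwv
        refine RowRel.consSome wv.2 _ ?_ ?_ (ih (i + 1) (by omega))
        · cases hQ : Qf (rowL cs i) with
          | nil => exact absurd hQ (row_word_ne hi hwv)
          | cons a t =>
            rw [List.head?_cons, hall a (by rw [hQ]; exact List.mem_cons_self ..)]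
        · intro _ x hx
          exact hall x hx

theorem rowrel_build (cs : List Char) :
    RowRel ((List.range cs.length).map (fun k => Qf (rowL cs k)))
           ((List.range cs.length).map (gD cs)) := by
  rw [List.range_eq_range']
  exact rowrel_build_aux cs cs.length 0 (by omega)

theorem gD_bound {cs : List Char} {i : Nat} {z : Int} (h : gD cs i = some z) :
    0 ≤ z ∧ z ≤ 9 := by
  unfold gD at h
  split at h
  · split at h
    · rename_i hdig
      have hb := isdigit_toNat hdig
      have hz : z = (cs[i].toNat : Int) - 48 := by
        injection h with h'
        omega
      omega
    · rcases Option.map_eq_some_iff.mp h with ⟨wv, hwv, rfl⟩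
      have hm := List.mem_of_find?_eq_some hwv
      fin_cases hm <;> simp
  · exact absurd h (by simp)

-- one step of B's scan
def stepB (fl : Int × Int) (o : Option Int) : Int × Int :=
  let d := o.getD (-1)
  if d ≥ 0 then ((if fl.1 < 0 then d else fl.1), d) else fl

theorem stepB_none (fl : Int × Int) : stepB fl none = fl := rfl

theorem stepB_some (fl : Int × Int) {z : Int} (hz : 0 ≤ z) :
    stepB fl (some z) = ((if fl.1 < 0 then z else fl.1), z) := by
  simp only [stepB, Option.getD_some]
  rw [if_pos (by omega)]

-- B's fold records (first digit, last digit)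
theorem foldB (os : List (Option Int)) (f l : Int)
    (hnn : ∀ z ∈ os.filterMap id, 0 ≤ z) :
    os.foldl stepB (f, l) =
      ((if f < 0 then (os.filterMap id).head?.getD f else f),
       (os.filterMap id).getLast?.getD l) := by
  induction os generalizing f l with
  | nil => simp
  | cons o os ih =>
    cases o with
    | none =>
      rw [List.foldl_cons, stepB_none]
      rw [ih f l (by simpa using hnn)]
      simp
    | some z =>
      have hz : 0 ≤ z := hnn z (by simp)
      rw [List.foldl_cons, stepB_some _ hz]
      have hnn' : ∀ w ∈ List.filterMap id os, 0 ≤ w := by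
        intro w hw
        rcases List.mem_filterMap.mp hw with ⟨a, ha, haw⟩
        exact hnn w (List.mem_filterMap.mpr ⟨a, by simp [ha], haw⟩)
      have hfst : (if (if f < 0 then z else f) < 0 then
          ((os.filterMap id).head?.getD (if f < 0 then z else f)) else if f < 0 then z else f)
          = if f < 0 then z else f := by
        split_ifs with h1 h2 <;> omega
      rw [ih _ _ hnn', hfst]
      have he : List.filterMap id (some z :: os) = z :: List.filterMap id os := by simp
      rw [he, List.getLast?_cons]
      simp

theorem Qf_append (xs ys : List String) : Qf (xs ++ ys) = Qf xs ++ Qf ys := by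
  simp [Qf, List.filter_append]

theorem Qf_flatten (Ls : List (List String)) : Qf Ls.flatten = (Ls.map Qf).flatten := by
  induction Ls with
  | nil => simp [Qf]
  | cons L Ls ih => simp [Qf_append, ih]

theorem A_char (text : String) :
    get_calibration_value text =
      (let Q := ((List.range text.toList.length).map (fun i => Qf (rowL text.toList i))).flatten
       if pyFalsy Q.head? then 0
       else (PySem.Int.ofStr? (Q.head?.getD "" ++ Q.getLast?.getD "")).getD 0) := by
  unfold get_calibration_value
  simp only [PySem.Str.len]
  rw [show ((text.toList.length : Int) + 1) = ((text.toList.length + 1 : Nat) : Int) by push_cast; ring]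
  rw [PySem.List.pyRange_zero_nat, PySem.List.pyRange_zero_nat, List.foldl_map]
  rw [PySem.List.foldl_congr_mem (List.range text.toList.length) _
      (fun (d : Option String × Option String) (i : Nat) =>
        List.foldl (fun d s => check_string s d) d (rowL text.toList i)) (none, none)
      (by
        intro acc i _
        simp only [rowL]
        rw [List.foldl_map, List.foldl_map]
        refine PySem.List.foldl_congr_mem _ _ _ _ ?_
        intro acc2 j _
        congr 1
        simp [PySem.Str.slice, PySem.Chars.slice, PySem.List.slice_natCast, strj, String.ofList])]
  rw [show (List.foldl (fun (digits : Option String × Option String) (i : Nat) =>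
        List.foldl (fun d s => check_string s d) digits (rowL text.toList i)) (none, none)
        (List.range text.toList.length)) =
      List.foldl (fun d s => check_string s d) (none, none)
        (((List.range text.toList.length).map (rowL text.toList)).flatten) by
    rw [List.foldl_flatten, List.foldl_map]]
  rw [checkfold]
  have hQ : Qf (((List.range text.toList.length).map (rowL text.toList)).flatten) =
      ((List.range text.toList.length).map (fun i => Qf (rowL text.toList i))).flatten := by
    rw [Qf_flatten, List.map_map]
    rfl
  simp only [hQ, show pyFalsy none = true from rfl, if_true, Option.or_none]

theorem B_char (text : String) :
    get_calibration_value_alt text =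
      (let fs := ((List.range text.toList.length).map (gD text.toList)).filterMap id
       if (fs.head?.getD (-1)) ≥ 0 then 10 * fs.head?.getD (-1) + fs.getLast?.getD (-1) else 0) := by
  simp only [get_calibration_value_alt]
  rw [PySem.List.enumerate_eq_map_pyRange text.toList 'a', List.foldl_map]
  simp only [PySem.List.len]
  rw [PySem.List.pyRange_zero_nat, List.foldl_map]
  rw [PySem.List.foldl_congr_mem _ _
      (fun fl k => stepB fl (gD text.toList k)) _ ?_]
  · rw [← List.foldl_map, foldB _ _ _ ?hnn]
    · simp only [show ((-1 : Int) < 0) = True by simp, if_true]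
    case hnn =>
      intro z hz
      rcases List.mem_filterMap.mp hz with ⟨o, ho, hoz⟩
      rcases List.mem_map.mp ho with ⟨k, _, hk⟩
      exact (gD_bound (by rw [hk]; exact hoz)).1
  · intro acc k hk
    have hkn : k < text.toList.length := List.mem_range.mp hk
    simp only [PySem.List.pyGetD_natCast, Int.toNat_natCast]
    rw [List.getD_eq_getElem _ _ hkn]
    unfold gD stepB
    rw [dif_pos hkn]
    by_cases hdig : PySem.Chars.isdigit text.toList[k] = true
    · have hb := isdigit_toNat hdig
      have hc : ('0' ≤ text.toList[k] ∧ text.toList[k] ≤ '9') := by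
        simpa [PySem.Chars.isdigit] using hdig
      rw [if_pos hc, if_pos hdig]
      simp only [Option.getD_some]
      norm_num [show ('0' : Char).toNat = 48 from rfl]
    · have hc : ¬('0' ≤ text.toList[k] ∧ text.toList[k] ≤ '9') := by
        simpa [PySem.Chars.isdigit] using hdig
      rw [if_neg hc, if_neg hdig]
      cases hf : WORDS.find? (fun wv => startsAt text.toList k wv.1) <;> simp

-- ===== VERDICT (by name: the statement is the Claim_ definition above) =====
theorem get_calibration_value_spec : Claim_equal_get_calibration_value := by
  unfold Claim_equal_get_calibration_value
  intro text _
  unfold Spec_get_calibration_value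
  rw [A_char, B_char]
  obtain ⟨hh, hl⟩ := rowrel_core (rowrel_build text.toList)
  set fs := ((List.range text.toList.length).map (gD text.toList)).filterMap id with hfs
  simp only []
  cases hfsc : fs with
  | nil =>
    rw [hfsc] at hh hl
    simp only [List.head?_nil, Option.map_none] at hh
    rw [hh]
    simp [pyFalsy]
  | cons z1 t =>
    have hmem1 : z1 ∈ fs := by rw [hfsc]; exact List.mem_cons_self ..
    have hb1 : 0 ≤ z1 ∧ z1 ≤ 9 := by
      rcases List.mem_filterMap.mp hmem1 with ⟨o, ho, hoz⟩
      rcases List.mem_map.mp ho with ⟨k, -, hk⟩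
      exact gD_bound (by rw [hk]; exact hoz)
    have hgl : fs.getLast?.isSome = true := by
      rw [List.getLast?_isSome, hfsc]
      simp
    obtain ⟨z2, hz2⟩ := Option.isSome_iff_exists.mp hgl
    have hb2 : 0 ≤ z2 ∧ z2 ≤ 9 := by
      rcases List.mem_filterMap.mp (List.mem_of_getLast? hz2) with ⟨o, ho, hoz⟩
      rcases List.mem_map.mp ho with ⟨k, -, hk⟩
      exact gD_bound (by rw [hk]; exact hoz)
    rw [hfsc] at hh
    simp only [List.head?_cons, Option.map_some] at hh
    rw [hz2] at hl
    simp only [Option.map_some] at hl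
    rw [hfsc] at hz2
    rw [hh, hl, List.head?_cons, hz2]
    simp only [Option.getD_some]
    obtain ⟨h1a, h1b⟩ := hb1
    obtain ⟨h2a, h2b⟩ := hb2
    interval_cases z1 <;> interval_cases z2 <;> decide
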